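-- pv_equiv track=rewrite | github.com/mwillsey/crossbot | crossbot/predictor.py | nth
-- ===== SOURCE A (Python) =====
-- import bisect
--
-- def nth(uids, dates, ts):
--     uid_dates = {
--         the_uid: sorted([t for uid, t in zip(uids, ts) if uid == the_uid])
--         for the_uid in set(uids)
--     }
--     return [
--         bisect.bisect(uid_dates[uid], ts) + 1
--         for uid, date, ts in zip(uids, dates, ts)
--     ]
-- ===== SOURCE B (Python) =====
-- import bisect
--
-- def nth(uids, dates, ts):
--     groups = {}
--     for uid, t in zip(uids, ts):
--         groups.setdefault(uid, []).append(t)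
--     for v in groups.values():
--         v.sort()
--     return [bisect.bisect_right(groups[uid], t) + 1
--             for uid, _, t in zip(uids, dates, ts)]
-- ===== Notes on version B (the rewrite author's own statement) =====
-- stated objective: faster
-- what changed: A rebuilds each uid's time list by scanning the whole zip(uids, ts) once per distinct uid; B groups all times by uid in a single dict pass (setdefault/append), sorts each group once, and bisects as before.
import Mathlib
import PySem

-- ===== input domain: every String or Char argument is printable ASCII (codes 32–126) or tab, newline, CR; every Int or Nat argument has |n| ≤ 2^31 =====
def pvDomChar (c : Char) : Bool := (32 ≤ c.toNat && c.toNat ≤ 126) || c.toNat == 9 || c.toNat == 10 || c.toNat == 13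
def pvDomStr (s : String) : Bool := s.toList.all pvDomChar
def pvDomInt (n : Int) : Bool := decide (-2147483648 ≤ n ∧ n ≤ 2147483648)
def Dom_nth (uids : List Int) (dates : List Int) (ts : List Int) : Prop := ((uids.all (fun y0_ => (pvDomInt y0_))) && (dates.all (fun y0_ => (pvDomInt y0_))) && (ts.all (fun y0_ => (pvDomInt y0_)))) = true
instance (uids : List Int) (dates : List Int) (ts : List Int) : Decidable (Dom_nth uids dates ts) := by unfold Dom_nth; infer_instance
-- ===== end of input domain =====

-- B replaces A's per-uid scan over zip(uids, ts) (one pass per distinct uid) with a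
-- single grouping pass into a dict, then sorts each group; same bisect-based result.

-- ===== PORT A =====
-- A's dict comprehension: {the_uid: sorted([t for uid, t in zip(uids, ts) if uid == the_uid]) for the_uid in set(uids)}
def nthDictA (uids : List Int) (ts : List Int) : PySem.Dict Int (List Int) :=
  PySem.Dict.ofList ((PySem.Set.ofList uids).map (fun u =>
    (u, PySem.List.sorted (((uids.zip ts).filter (fun p => p.1 == u)).map (fun p => p.2)) (fun x => x) false)))

-- uid_dates[uid] never raises (every uid of the zip is in set(uids)), so getD _ [] is that lookup
def nth (uids : List Int) (dates : List Int) (ts : List Int) : List Int :=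
  (uids.zip (dates.zip ts)).map (fun p =>
    ((PySem.List.bisectRight ((nthDictA uids ts).getD p.1 []) p.2.2 : Nat) : Int) + 1)

-- ===== PORT B =====
-- one grouping pass: groups.setdefault(uid, []).append(t)
def nthGroups (uids : List Int) (ts : List Int) : PySem.Dict Int (List Int) :=
  (uids.zip ts).foldl (fun d p => d.modify p.1 [] (fun v => v ++ [p.2])) PySem.Dict.empty

-- for v in groups.values(): v.sort()
def nthSortedGroups (uids : List Int) (ts : List Int) : PySem.Dict Int (List Int) :=
  PySem.Dict.mk ((nthGroups uids ts).items.map (fun p => (p.1, PySem.List.sorted p.2 (fun x => x) false)))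

-- groups[uid] never raises (every uid of the 3-zip occurs in zip(uids, ts)), so getD _ [] is that lookup
def nth_alt (uids : List Int) (dates : List Int) (ts : List Int) : List Int :=
  (uids.zip (dates.zip ts)).map (fun p =>
    ((PySem.List.bisectRight ((nthSortedGroups uids ts).getD p.1 []) p.2.2 : Nat) : Int) + 1)

-- ===== PRECONDITION & SPEC =====
def Spec_nth (uids : List Int) (dates : List Int) (ts : List Int) (out : List Int) : Prop := out = nth_alt uids dates ts
instance (uids : List Int) (dates : List Int) (ts : List Int) (out : List Int) : Decidable (Spec_nth uids dates ts out) := by unfold Spec_nth; infer_instance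

-- ===== CLAIM (what is proved, stated in full; the proofs are below) =====
def Claim_equal_nth : Prop := ∀ (uids : List Int) (dates : List Int) (ts : List Int), Dom_nth uids dates ts → Spec_nth uids dates ts (nth uids dates ts)

-- ===== LEMMAS AND PROOFS =====

-- lookup in A's comprehension dict, keyed by the (Nodup) elements of set(uids)
theorem dictA_getD (uids ts : List Int) (u : Int) (hu : u ∈ uids) :
    (nthDictA uids ts).getD u []
      = PySem.List.sorted (((uids.zip ts).filter (fun p => p.1 == u)).map (fun p => p.2)) (fun x => x) false := by
  set f : Int → List Int := fun u => PySem.List.sorted (((uids.zip ts).filter (fun p => p.1 == u)).map (fun p => p.2)) (fun x => x) false with hf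
  have hnd : (PySem.Set.ofList uids).Nodup := PySem.Set.nodup_ofList uids
  have hmapnd : (List.map ((fun p => p.1) ∘ fun u => (u, f u)) (PySem.Set.ofList uids)).Nodup := by
    have : ((fun p => p.1) ∘ fun u => (u, f u)) = (fun (u : Int) => u) := rfl
    rw [this, List.map_id']; exact hnd
  have hitems : (nthDictA uids ts).items = (PySem.Set.ofList uids).map (fun u => (u, f u)) := by
    have h := PySem.Dict.items_foldl_insert_fresh ((PySem.Set.ofList uids).map (fun u => (u, f u)))
      (fun p => p.1) (fun p => p.2) PySem.Dict.empty
      (by intro a _; exact PySem.Dict.contains_empty _)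
      (by rw [List.map_map]; exact hmapnd)
    simpa using h
  have hkeys : (nthDictA uids ts).keys.Nodup := by
    show ((nthDictA uids ts).items.map (fun p => p.1)).Nodup
    rw [hitems, List.map_map]; exact hmapnd
  have hmem : (u, f u) ∈ (nthDictA uids ts).items := by
    rw [hitems]; exact List.mem_map_of_mem ((PySem.Set.mem_ofList uids u).mpr hu)
  exact PySem.Dict.getD_of_mem_items _ hmem hkeys []

-- lookup in B's grouped-then-sorted dict gives the sorted group of u
theorem dictB_getD (uids ts : List Int) (u : Int) (hu : u ∈ (uids.zip ts).map (fun p => p.1)) :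
    (nthSortedGroups uids ts).getD u []
      = PySem.List.sorted (((uids.zip ts).filter (fun p => p.1 == u)).map (fun p => p.2)) (fun x => x) false := by
  have hknd : (nthGroups uids ts).keys.Nodup := by
    exact PySem.Dict.nodup_keys_foldl_modify_key (uids.zip ts) (fun p => p.1) []
      (fun d p => fun v => v ++ [p.2]) PySem.Dict.empty PySem.Dict.nodup_keys_empty
  have hgu : (nthGroups uids ts).getD u []
      = ((uids.zip ts).filter (fun p => p.1 == u)).map (fun p => p.2) := by
    have h := PySem.Dict.getD_foldl_modify_append (uids.zip ts) PySem.Dict.empty u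
    simpa [PySem.Dict.getD_empty] using h
  have hukeys : u ∈ (nthGroups uids ts).keys := by
    have h := PySem.Dict.keys_foldl_modify_key (uids.zip ts) (fun p => p.1) []
      (fun d p => fun v => v ++ [p.2]) PySem.Dict.empty
    rw [show (nthGroups uids ts).keys = PySem.Set.update PySem.Dict.empty.keys ((uids.zip ts).map (fun p => p.1)) from h,
        PySem.Dict.keys_empty, PySem.Set.update_nil_left]
    exact (PySem.Set.mem_ofList _ _).mpr hu
  obtain ⟨q, hq, hq1⟩ := List.mem_map.mp hukeys
  obtain ⟨k, v⟩ := q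
  subst hq1
  have hgv : (nthGroups uids ts).getD k [] = v := PySem.Dict.getD_of_mem_items _ hq hknd []
  have hsitems : (nthSortedGroups uids ts).items
      = (nthGroups uids ts).items.map (fun p => (p.1, PySem.List.sorted p.2 (fun x => x) false)) := rfl
  have hsknd : (nthSortedGroups uids ts).keys.Nodup := by
    show ((nthSortedGroups uids ts).items.map (fun p => p.1)).Nodup
    rw [hsitems, List.map_map]
    exact hknd
  have hmem : (k, PySem.List.sorted v (fun x => x) false) ∈ (nthSortedGroups uids ts).items := by
    rw [hsitems]; exact List.mem_map_of_mem hq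
  rw [PySem.Dict.getD_of_mem_items _ hmem hsknd [], ← hgv, hgu]

-- a uid of the 3-way zip occurs among the firsts of zip(uids, ts)
theorem fst_mem_zip2 (uids dates ts : List Int) (p : Int × Int × Int)
    (hp : p ∈ uids.zip (dates.zip ts)) : p.1 ∈ (uids.zip ts).map (fun q => q.1) := by
  obtain ⟨i, hi, rfl⟩ := List.mem_iff_getElem.mp hp
  simp only [List.length_zip, lt_min_iff] at hi
  simp only [List.getElem_zip, List.mem_map]
  exact ⟨(uids[i]'(by omega), ts[i]'(by omega)),
    List.mem_iff_getElem.mpr ⟨i, by simp [List.length_zip]; omega, by simp [List.getElem_zip]⟩, rfl⟩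

-- ===== VERDICT (by name: the statement is the Claim_ definition above) =====
theorem nth_spec : Claim_equal_nth := by
  intro uids dates ts _
  unfold Spec_nth nth nth_alt
  refine List.map_congr_left ?_
  intro p hp
  have h1 : p.1 ∈ (uids.zip ts).map (fun q => q.1) := fst_mem_zip2 uids dates ts p hp
  have h0 : p.1 ∈ uids := (List.of_mem_zip (by exact hp)).1
  rw [dictA_getD uids ts p.1 h0, dictB_getD uids ts p.1 h1]
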